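-- pv_equiv track=rewrite | github.com/lishuangshuang0616/zUMIs_dev | generate_stats.py | cigar_ref_len
-- ===== SOURCE A (Python) =====
-- def cigar_ref_len(cigar):
--     """
--     Calculates the reference genome length corresponding to the CIGAR string,
--     handling S and H operators.
--     """
--     if not cigar or cigar == '*':
--         return 0
--     num = 0
--     ref_len = 0
--     for ch in cigar:
--         o = ord(ch)
--         if 48 <= o <= 57:
--             num = num * 10 + (o - 48)  # Digit
--             continue
--         if ch in ('M', 'D', 'N', '=', 'X'):
--             ref_len += num  # Add to reference length
--         num = 0
--     return ref_len
-- ===== SOURCE B (Python) =====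
-- import re
--
-- _REF_OPS = frozenset('MDN=X')
--
-- def cigar_ref_len(cigar):
--     """
--     Calculates the reference genome length corresponding to the CIGAR string,
--     handling S and H operators.
--     """
--     if not cigar or cigar == '*':
--         return 0
--     return sum(int(n) for n, op in re.findall(r'(\d+)(\D)', cigar)
--                if op in _REF_OPS)
-- ===== Notes on version B (the rewrite author's own statement) =====
-- stated objective: idiomatic
-- what changed: Replaces the character-by-character digit-accumulator state machine with regex tokenization: re.findall(r'(\d+)(\D)') builds the (count, operator) token list once and the result is a filtered sum over it; the scan runs inside the C regex engine instead of the Python bytecode loop.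
import Mathlib
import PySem

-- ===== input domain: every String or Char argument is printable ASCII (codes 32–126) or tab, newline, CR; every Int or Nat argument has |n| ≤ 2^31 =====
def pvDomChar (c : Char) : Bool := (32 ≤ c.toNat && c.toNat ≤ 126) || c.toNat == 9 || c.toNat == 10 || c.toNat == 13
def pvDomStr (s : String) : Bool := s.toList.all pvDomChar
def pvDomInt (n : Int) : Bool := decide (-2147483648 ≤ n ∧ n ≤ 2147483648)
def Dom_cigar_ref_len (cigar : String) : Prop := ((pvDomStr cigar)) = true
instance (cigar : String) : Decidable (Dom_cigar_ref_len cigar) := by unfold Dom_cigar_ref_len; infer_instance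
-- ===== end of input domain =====

-- B replaces A's char-by-char digit-accumulator loop with regex tokenization
-- (findall of (\d+)(\D) then a filtered sum); objective: idiomatic, same cost.


-- ===== PORT A =====
-- the loop body over state (num, ref_len)
def pvAStep (p : Int × Int) (ch : Char) : Int × Int :=
  let o : Int := ch.toNat
  if 48 ≤ o ∧ o ≤ 57 then (p.1 * 10 + (o - 48), p.2)
  else if ch = 'M' ∨ ch = 'D' ∨ ch = 'N' ∨ ch = '=' ∨ ch = 'X' then (0, p.2 + p.1)
  else (0, p.2)

def cigar_ref_len (cigar : String) : Int :=
  if cigar = "" ∨ cigar = "*" then 0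
  else (cigar.toList.foldl pvAStep (0, 0)).2

-- ===== PORT B =====
-- \d on the printable-ASCII domain
def pvIsDig (c : Char) : Bool := 48 ≤ c.toNat && c.toNat ≤ 57
-- int(n) for an n matched by \d+ (a nonempty ASCII digit run); exact there
def pvIntDigits (cs : List Char) : Int :=
  cs.foldl (fun a c => a * 10 + ((c.toNat : Int) - 48)) 0
-- re.findall(r'(\d+)(\D)', s): leftmost non-overlapping maximal digit run + one
-- non-digit; hand-ported, exact on the ASCII domain
def pvFindall : List Char → List (List Char × Char)
  | [] => []
  | c :: rest =>
    if pvIsDig c then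
      match h : (c :: rest).dropWhile pvIsDig with
      | [] => []
      | op :: tl => ((c :: rest).takeWhile pvIsDig, op) :: pvFindall tl
    else pvFindall rest
  termination_by l => l.length
  decreasing_by
  · have : ((c :: rest).dropWhile pvIsDig).length ≤ (c :: rest).length :=
      List.length_dropWhile_le _ _
    rw [h] at this; simp at this ⊢; omega
  · simp

def pvOpB (op : Char) : Bool := ['M', 'D', 'N', '=', 'X'].contains op

def cigar_ref_len_alt (cigar : String) : Int :=
  if cigar = "" ∨ cigar = "*" then 0
  else ((pvFindall cigar.toList).filter (fun t => pvOpB t.2)).foldl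
    (fun a t => a + pvIntDigits t.1) 0

-- ===== PRECONDITION & SPEC =====
def Spec_cigar_ref_len (cigar : String) (out : Int) : Prop := out = cigar_ref_len_alt cigar
instance (cigar : String) (out : Int) : Decidable (Spec_cigar_ref_len cigar out) := by unfold Spec_cigar_ref_len; infer_instance

-- ===== CLAIM (what is proved, stated in full; the proofs are below) =====
def Claim_equal_cigar_ref_len : Prop := ∀ (cigar : String), Dom_cigar_ref_len cigar → Spec_cigar_ref_len cigar (cigar_ref_len cigar)

-- ===== LEMMAS AND PROOFS =====

-- sum of the token values B keeps
def pvW (ts : List (List Char × Char)) : Int :=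
  (ts.map (fun t => if pvOpB t.2 then pvIntDigits t.1 else 0)).sum

theorem pvFoldl_filter_eq_W (ts : List (List Char × Char)) (a : Int) :
    (ts.filter (fun t => pvOpB t.2)).foldl (fun a t => a + pvIntDigits t.1) a
      = a + pvW ts := by
  induction ts generalizing a with
  | nil => simp [pvW]
  | cons t ts ih =>
    simp only [pvW, List.map_cons, List.sum_cons, List.filter_cons]
    by_cases h : pvOpB t.2 <;> simp [h, ih, pvW] <;> ring_nf

theorem pvAStep_digit (p : Int × Int) (c : Char) (h : pvIsDig c = true) :
    pvAStep p c = (p.1 * 10 + ((c.toNat : Int) - 48), p.2) := by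
  simp [pvIsDig] at h
  simp [pvAStep]
  omega

theorem pvFoldl_digits (ds : List Char) (h : ∀ c ∈ ds, pvIsDig c = true) :
    ∀ (l : List Char) (num ref : Int),
    List.foldl pvAStep (num, ref) (ds ++ l)
      = List.foldl pvAStep (ds.foldl (fun a c => a * 10 + ((c.toNat : Int) - 48)) num, ref) l := by
  induction ds with
  | nil => intro l num ref; simp
  | cons c ds ih =>
    intro l num ref
    have hc := h c (by simp)
    simp only [List.cons_append, List.foldl_cons, pvAStep_digit _ _ hc]
    exact ih (fun x hx => h x (by simp [hx])) l _ ref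

theorem pvAStep_nondigit (num ref : Int) (c : Char) (h : pvIsDig c = false) :
    pvAStep (num, ref) c = (0, ref + if pvOpB c then num else 0) := by
  have h' : ¬(48 ≤ (c.toNat : Int) ∧ (c.toNat : Int) ≤ 57) := by
    simp [pvIsDig] at h; omega
  simp only [pvAStep, if_neg h']
  by_cases hop : c = 'M' ∨ c = 'D' ∨ c = 'N' ∨ c = '=' ∨ c = 'X'
  · have hb : pvOpB c = true := by simp [pvOpB]; tauto
    simp [hop, hb]
  · have hb : pvOpB c = false := by simp [pvOpB]; tauto
    simp [hop, hb]

theorem pvMain (l : List Char) : ∀ ref : Int,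
    (List.foldl pvAStep (0, ref) l).2 = ref + pvW (pvFindall l) := by
  induction l using pvFindall.induct with
  | case1 => intro ref; simp [pvFindall, pvW]
  | case2 c rest hc hdrop =>
    intro ref
    -- the whole remaining string is one digit run; no token, ref unchanged
    have hall : ∀ x ∈ c :: rest, pvIsDig x = true := by
      intro x hx
      have hsplit := List.takeWhile_append_dropWhile (p := pvIsDig) (l := c :: rest)
      rw [hdrop, List.append_nil] at hsplit
      rw [← hsplit] at hx
      exact List.mem_takeWhile_imp hx
    have h2 := pvFoldl_digits (c :: rest) hall [] 0 ref
    rw [List.append_nil] at h2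
    rw [h2]
    have hdrop' : List.dropWhile pvIsDig rest = [] := by
      simpa [List.dropWhile_cons, hc] using hdrop
    have hf : pvFindall (c :: rest) = [] := by
      rw [pvFindall.eq_def]
      simp only [hc, if_true]
      split <;> simp_all
    simp [hf, pvW]
  | case3 c rest hc op tl hdrop ih =>
    intro ref
    have hds : ∀ x ∈ (c :: rest).takeWhile pvIsDig, pvIsDig x = true :=
      fun x hx => List.mem_takeWhile_imp hx
    have hsplit : (c :: rest).takeWhile pvIsDig ++ (op :: tl) = c :: rest := by
      rw [← hdrop, List.takeWhile_append_dropWhile]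
    have hop : pvIsDig op = false := by
      have h0 := List.head_dropWhile_not pvIsDig (l := c :: rest) (by rw [hdrop]; simp)
      simpa [hdrop] using h0
    have hdrop' : List.dropWhile pvIsDig rest = op :: tl := by
      simpa [List.dropWhile_cons, hc] using hdrop
    have hf : pvFindall (c :: rest)
        = ((c :: rest).takeWhile pvIsDig, op) :: pvFindall tl := by
      rw [pvFindall.eq_def]
      simp only [hc, if_true]
      split <;> simp_all
    rw [← hsplit, pvFoldl_digits _ hds, List.foldl_cons,
      pvAStep_nondigit _ _ _ hop]
    rw [hsplit, hf, ih]
    simp only [pvW, List.map_cons, List.sum_cons, pvIntDigits]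
    by_cases hP : pvOpB op <;> simp [hP] <;> ring
  | case4 c rest hc ih =>
    intro ref
    rw [List.foldl_cons, pvAStep_nondigit _ _ _ (by simpa using hc)]
    rw [ih]
    have hf : pvFindall (c :: rest) = pvFindall rest := by
      rw [pvFindall.eq_def]; simp [hc]
    rw [hf]
    split <;> ring_nf

-- ===== VERDICT (by name: the statement is the Claim_ definition above) =====
theorem cigar_ref_len_spec : Claim_equal_cigar_ref_len := by
  intro cigar _
  unfold Spec_cigar_ref_len cigar_ref_len cigar_ref_len_alt
  split
  · rfl
  · rw [pvMain, pvFoldl_filter_eq_W]
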